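-- pv_equiv track=rewrite | github.com/Vanixs/Hillel_python | Lessons_5/5.1.py | check_variable
-- ===== SOURCE A (Python) =====
-- import string
-- import keyword
--
-- def check_variable(name):
--     if name in keyword.kwlist:
--         return False
--     if any(char.isupper() for char in name):
--         return False
--     if name[0].isdigit():
--         return False
--     if "__" in name:
--         return False
--
--     forbidden = string.punctuation.replace("_", "") + " "
--     if any(char in forbidden for char in name):
--         return False
--
--     return True
-- ===== SOURCE B (Python) =====
-- import string
--
-- # keyword.kwlist (CPython 3), hardcoded
-- _KWLIST = ('False', 'None', 'True', 'and', 'as', 'assert', 'async', 'await',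
--            'break', 'class', 'continue', 'def', 'del', 'elif', 'else',
--            'except', 'finally', 'for', 'from', 'global', 'if', 'import',
--            'in', 'is', 'lambda', 'nonlocal', 'not', 'or', 'pass', 'raise',
--            'return', 'try', 'while', 'with', 'yield')
--
-- _FORBIDDEN = frozenset(string.punctuation.replace("_", "") + " ")
--
-- def check_variable(name):
--     if name in _KWLIST:
--         return False
--     if name[0].isdigit():
--         return False
--     prev = ""
--     for ch in name:
--         if ch.isupper() or ch in _FORBIDDEN or (ch == "_" and prev == "_"):
--             return False
--         prev = ch
--     return True
-- ===== Notes on version B (the rewrite author's own statement) =====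
-- stated objective: simpler
-- what changed: B replaces A's four separate scans (any-uppercase, '__' substring search, any-forbidden) with one pass over the characters that maintains the previous character to detect a double underscore.
import Mathlib
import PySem

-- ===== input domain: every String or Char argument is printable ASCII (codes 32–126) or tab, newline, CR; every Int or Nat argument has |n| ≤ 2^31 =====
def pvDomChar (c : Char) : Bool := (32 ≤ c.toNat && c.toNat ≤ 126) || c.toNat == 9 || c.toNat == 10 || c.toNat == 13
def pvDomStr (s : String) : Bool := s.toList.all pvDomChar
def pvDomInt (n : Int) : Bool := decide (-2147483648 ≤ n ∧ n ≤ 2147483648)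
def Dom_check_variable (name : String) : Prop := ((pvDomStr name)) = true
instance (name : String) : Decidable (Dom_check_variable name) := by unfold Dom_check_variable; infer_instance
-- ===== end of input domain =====

-- B folds A's four separate scans into one stateful pass (prev char tracked for '__'); same results.

-- ===== PORT A =====
-- keyword.kwlist (CPython 3)
def pvKwlist : List String :=
  ["False", "None", "True", "and", "as", "assert", "async", "await", "break",
   "class", "continue", "def", "del", "elif", "else", "except", "finally",
   "for", "from", "global", "if", "import", "in", "is", "lambda", "nonlocal",
   "not", "or", "pass", "raise", "return", "try", "while", "with", "yield"]

-- string.punctuation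
def pvPunctuation : List Char := "!\"#$%&'()*+,-./:;<=>?@[\\]^_`{|}~".toList

-- forbidden = string.punctuation.replace("_", "") + " "
def pvForbiddenA : List Char := PySem.Chars.replace pvPunctuation ['_'] [] ++ [' ']

def check_variable (name : String) : Bool :=
  if pvKwlist.contains name then false
  else if name.toList.any PySem.Chars.isupper then false
  else match PySem.Str.pyGet? name 0 with
  | none => false  -- Python raises IndexError here (name = ""); excluded by Pre_
  | some c0 =>
    if PySem.Chars.isdigit c0 then false
    else if PySem.Str.isIn "__" name then false
    -- 'char in forbidden' for a single char is char membership in the forbidden characters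
    else if name.toList.any (fun ch => pvForbiddenA.contains ch) then false
    else true

-- ===== PORT B =====
-- _FORBIDDEN = frozenset(string.punctuation.replace("_", "") + " ")
def pvForbiddenB : PySem.Set Char :=
  PySem.Set.ofList (PySem.Chars.replace pvPunctuation ['_'] [] ++ [' '])

-- the single pass: prev = previous character (none = "" before the loop)
def pvAltLoop (prev : Option Char) : List Char → Bool
  | [] => true
  | ch :: rest =>
      if PySem.Chars.isupper ch || pvForbiddenB.contains ch
          || (ch == '_' && prev == some '_') then false
      else pvAltLoop (some ch) rest

def check_variable_alt (name : String) : Bool :=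
  if pvKwlist.contains name then false
  else match PySem.Str.pyGet? name 0 with
  | none => false  -- name[0] raises IndexError in B too; excluded by Pre_
  | some c0 =>
    if PySem.Chars.isdigit c0 then false
    else pvAltLoop none name.toList

-- ===== PRECONDITION & SPEC =====
-- Pre_ excludes only the empty string, on which both Pythons raise IndexError at name[0].
def Pre_check_variable (name : String) : Prop := name ≠ ""
instance (name : String) : Decidable (Pre_check_variable name) := by unfold Pre_check_variable; infer_instance
def pvWitness_check_variable : String := "abc"

def Spec_check_variable (name : String) (out : Bool) : Prop := out = check_variable_alt name
instance (name : String) (out : Bool) : Decidable (Spec_check_variable name out) := by unfold Spec_check_variable; infer_instance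

-- ===== CLAIM (what is proved, stated in full; the proofs are below) =====
def Claim_equal_check_variable : Prop := ∀ (name : String), Dom_check_variable name → Pre_check_variable name → Spec_check_variable name (check_variable name)

-- ===== LEMMAS AND PROOFS =====

-- the double-underscore state machine, as a pure predicate
def pvHasDD (prev : Option Char) : List Char → Bool
  | [] => false
  | ch :: rest => (ch == '_' && prev == some '_') || pvHasDD (some ch) rest

lemma forb_eq : pvForbiddenB = pvForbiddenA := by decide

lemma altLoop_eq (l : List Char) (p : Option Char) :
    pvAltLoop p l
      = !(l.any PySem.Chars.isupper || l.any (fun ch => pvForbiddenA.contains ch) || pvHasDD p l) := by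
  induction l generalizing p with
  | nil => simp [pvAltLoop, pvHasDD]
  | cons c t ih =>
      simp only [pvAltLoop, forb_eq, pvHasDD, List.any_cons]
      by_cases h1 : PySem.Chars.isupper c = true <;>
        by_cases h2 : pvForbiddenA.contains c = true <;>
          by_cases h3 : (c == '_' && p == some '_') = true <;>
            simp [h1, h3, ih, Bool.and_comm, Bool.and_left_comm]

lemma any_decide_mem (t sub : List Char) :
    (t.any fun ch => decide (ch ∈ sub)) = decide (∃ x ∈ t, x ∈ sub) := by
  cases h : t.any fun ch => decide (ch ∈ sub) <;> simp_all

lemma prefix_dd (c : Char) (t : List Char) :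
    ['_', '_'] <+: c :: t ↔ c = '_' ∧ t.head? = some '_' := by
  cases t <;> simp [List.cons_prefix_cons, eq_comm]

lemma hasDD_iff (l : List Char) (p : Option Char) :
    pvHasDD p l = true ↔ (p = some '_' ∧ l.head? = some '_') ∨ ['_', '_'] <:+: l := by
  induction l generalizing p with
  | nil => simp [pvHasDD]
  | cons c t ih =>
      rw [List.infix_cons_iff]
      simp only [pvHasDD, Bool.or_eq_true, Bool.and_eq_true, beq_iff_eq, ih, List.head?_cons,
        prefix_dd, Option.some.injEq]
      tauto

lemma hasDD_none_eq (l : List Char) :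
    pvHasDD none l = PySem.Chars.isIn ['_', '_'] l := by
  cases h : PySem.Chars.isIn ['_', '_'] l with
  | false =>
      cases hdd : pvHasDD none l with
      | false => rfl
      | true =>
          exact absurd ((hasDD_iff l none).mp hdd)
            (by simp [(PySem.Chars.isIn_eq_false_iff _ _).mp h])
  | true => exact (hasDD_iff l none).mpr (Or.inr ((PySem.Chars.isIn_iff_infix _ _).mp h))

-- ===== VERDICT (by name: the statement is the Claim_ definition above) =====
theorem check_variable_spec : Claim_equal_check_variable := by
  intro name _ hpre
  show check_variable name = check_variable_alt name
  unfold check_variable check_variable_alt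
  by_cases hkw : pvKwlist.contains name = true
  · rw [if_pos hkw, if_pos hkw]
  · rw [if_neg hkw, if_neg hkw]
    have hne : name.toList ≠ [] := fun h =>
      hpre (by have := congrArg String.ofList h; simpa using this)
    have hget : PySem.Str.pyGet? name 0 = name.toList[0]? := by
      simpa using PySem.Str.pyGet?_natCast name (0 : Nat)
    rcases hl : name.toList with _ | ⟨c0, t⟩
    · exact absurd hl hne
    · have hsome : PySem.Str.pyGet? name 0 = some c0 := by rw [hget, hl]; rfl
      rw [hsome]
      simp only [altLoop_eq, hasDD_none_eq]
      have hin : PySem.Str.isIn "__" name = PySem.Chars.isIn ['_', '_'] name.toList := by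
        simp [PySem.Str.isIn]
      rw [hin, hl]
      by_cases hup : (c0 :: t).any PySem.Chars.isupper = true
      · by_cases hd : PySem.Chars.isdigit c0 = true <;> simp [hup, hd]
      · simp only [Bool.not_eq_true] at hup
        by_cases hd : PySem.Chars.isdigit c0 = true <;>
          by_cases hdd : PySem.Chars.isIn ['_', '_'] (c0 :: t) = true <;>
            by_cases hf : ((c0 :: t).any fun ch => pvForbiddenA.contains ch) = true <;>
              simp [hup, hd, hdd, hf, List.any_eq_true, any_decide_mem]
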